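-- pv_equiv track=rewrite | github.com/gaigutherz/Akkademia | src/check_translation.py | one_dict_to_three
-- ===== SOURCE A (Python) =====
-- def one_dict_to_three(dict):
--     d = {}
--     almost_d = {}
--     d_without_segmentation = {}
--
--     for dialect in dict:
--         d[dialect] = []
--         almost_d[dialect] = []
--         d_without_segmentation[dialect] = []
--         for l in dict[dialect]:
--             d[dialect].append(l[0])
--             almost_d[dialect].append(l[1])
--             d_without_segmentation[dialect].append(l[2])
--
--     return d, almost_d, d_without_segmentation
-- ===== SOURCE B (Python) =====
-- def one_dict_to_three(dict):
--     d = {}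
--     almost_d = {}
--     d_without_segmentation = {}
--     for dialect, triples in dict.items():
--         cols = list(zip(*triples))
--         if cols:
--             d[dialect] = list(cols[0])
--             almost_d[dialect] = list(cols[1])
--             d_without_segmentation[dialect] = list(cols[2])
--         else:
--             d[dialect] = []
--             almost_d[dialect] = []
--             d_without_segmentation[dialect] = []
--     return d, almost_d, d_without_segmentation
-- ===== Notes on version B (the rewrite author's own statement) =====
-- stated objective: idiomatic
-- what changed: Replaces the element-by-element inner append loop over the three target lists by a single column-wise zip(*rows) transpose per dialect, assigning the three columns at once.
import Mathlib
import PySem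

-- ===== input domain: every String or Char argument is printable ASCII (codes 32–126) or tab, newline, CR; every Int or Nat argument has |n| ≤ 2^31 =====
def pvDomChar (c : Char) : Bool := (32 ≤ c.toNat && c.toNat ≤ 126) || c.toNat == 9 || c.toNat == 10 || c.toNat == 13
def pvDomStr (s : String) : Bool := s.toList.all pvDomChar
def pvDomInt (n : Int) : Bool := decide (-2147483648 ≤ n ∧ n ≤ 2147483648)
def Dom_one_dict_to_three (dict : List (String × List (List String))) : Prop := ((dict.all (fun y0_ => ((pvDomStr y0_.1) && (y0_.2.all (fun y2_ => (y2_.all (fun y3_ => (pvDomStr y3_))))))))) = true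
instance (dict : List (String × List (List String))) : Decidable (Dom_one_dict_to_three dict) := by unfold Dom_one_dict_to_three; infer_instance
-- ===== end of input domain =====

-- B replaces the inner element-by-element append loop with one column-wise zip(*rows) transpose per dialect (idiomatic; same cost).

-- ===== PORT A =====
-- The Python parameter is a dict; the association-list argument is materialised with Dict.ofList
-- (duplicate keys overwrite in place, as in Python). l[0]/l[1]/l[2] are pyGet?; the IndexError
-- case (a row shorter than 3) is excluded by Pre_, so .getD "" is never reached inside Pre_.
def one_dict_to_three (dict : List (String × List (List String))) : (List (String × List String)) × (List (String × List String)) × (List (String × List String)) :=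
  let D := PySem.Dict.ofList dict
  let r := D.keys.foldl (fun t dialect =>
    let d := t.1.insert dialect []
    let a := t.2.1.insert dialect []
    let w := t.2.2.insert dialect []
    (D.getD dialect []).foldl (fun t l =>
      (t.1.modify dialect [] (fun v => v ++ [(PySem.List.pyGet? l 0).getD ""]),
       t.2.1.modify dialect [] (fun v => v ++ [(PySem.List.pyGet? l 1).getD ""]),
       t.2.2.modify dialect [] (fun v => v ++ [(PySem.List.pyGet? l 2).getD ""])))
      (d, a, w))
    (PySem.Dict.empty, PySem.Dict.empty, PySem.Dict.empty)
  (r.1.items, r.2.1.items, r.2.2.items)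

-- ===== PORT B =====
-- zip(*rows): transpose truncated at the shortest row (fuel = length of the first row suffices,
-- since the result never has more columns than the first row has elements).
def pvZipStarGo : Nat → List (List String) → List (List String)
  | 0, _ => []
  | n + 1, rows =>
    if rows.all (fun l => !l.isEmpty)
    then rows.map (fun l => l.headD "") :: pvZipStarGo n (rows.map List.tail)
    else []

def pvZipStar : List (List String) → List (List String)
  | [] => []
  | r :: rs => pvZipStarGo r.length (r :: rs)

-- The `cols` of Source B; `if cols:` is the [] branch.  A nonempty `cols` with fewer than three
-- columns makes the Python raise IndexError (outside Pre_); the catch-all branch covers it.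
def one_dict_to_three_alt (dict : List (String × List (List String))) : (List (String × List String)) × (List (String × List String)) × (List (String × List String)) :=
  let D := PySem.Dict.ofList dict
  let r := D.items.foldl (fun t p =>
      match pvZipStar p.2 with
      | c0 :: c1 :: c2 :: _ => (t.1.insert p.1 c0, t.2.1.insert p.1 c1, t.2.2.insert p.1 c2)
      | _ => (t.1.insert p.1 [], t.2.1.insert p.1 [], t.2.2.insert p.1 []))
    (PySem.Dict.empty, PySem.Dict.empty, PySem.Dict.empty)
  (r.1.items, r.2.1.items, r.2.2.items)

-- ===== PRECONDITION & SPEC =====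
-- Pre_ excludes inputs on which the Python A raises IndexError: some row shorter than 3 entries.
def Pre_one_dict_to_three (dict : List (String × List (List String))) : Prop :=
  ∀ p ∈ dict, ∀ l ∈ p.2, 3 ≤ l.length
instance (dict : List (String × List (List String))) : Decidable (Pre_one_dict_to_three dict) := by unfold Pre_one_dict_to_three; infer_instance

def pvWitness_one_dict_to_three : (List (String × List (List String))) :=
  [("OB", [["a", "b", "c"], ["d", "e", "f"]]), ("SB", [])]

def Spec_one_dict_to_three (dict : List (String × List (List String))) (out : (List (String × List String)) × (List (String × List String)) × (List (String × List String))) : Prop := out = one_dict_to_three_alt dict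
instance (dict : List (String × List (List String))) (out : (List (String × List String)) × (List (String × List String)) × (List (String × List String))) : Decidable (Spec_one_dict_to_three dict out) := by unfold Spec_one_dict_to_three; infer_instance

-- ===== CLAIM (what is proved, stated in full; the proofs are below) =====
def Claim_equal_one_dict_to_three : Prop := ∀ (dict : List (String × List (List String))), Dom_one_dict_to_three dict → Pre_one_dict_to_three dict → Spec_one_dict_to_three dict (one_dict_to_three dict)

-- ===== LEMMAS AND PROOFS =====

theorem pv_modify_eq_insert (d : PySem.Dict String (List String)) (k : String)
    (f : List String → List String) :
    d.modify k [] f = d.insert k (f (d.getD k [])) := by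
  simp [PySem.Dict.modify]

-- the inner append loop of A fills the three freshly inserted slots with the three columns
theorem pv_inner_loop (k : String) (g0 g1 g2 : List String → String)
    (rows : List (List String)) (d a w : PySem.Dict String (List String))
    (x y z : List String) :
    rows.foldl (fun t l =>
        (t.1.modify k [] (fun v => v ++ [g0 l]),
         t.2.1.modify k [] (fun v => v ++ [g1 l]),
         t.2.2.modify k [] (fun v => v ++ [g2 l])))
      (d.insert k x, a.insert k y, w.insert k z)
      = (d.insert k (x ++ rows.map g0), a.insert k (y ++ rows.map g1),
         w.insert k (z ++ rows.map g2)) := by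
  induction rows generalizing x y z with
  | nil => simp
  | cons l ls ih =>
    rw [List.foldl_cons]
    have hstep :
        ((d.insert k x).modify k [] (fun v => v ++ [g0 l]),
         (a.insert k y).modify k [] (fun v => v ++ [g1 l]),
         (w.insert k z).modify k [] (fun v => v ++ [g2 l]))
          = (d.insert k (x ++ [g0 l]), a.insert k (y ++ [g1 l]), w.insert k (z ++ [g2 l])) := by
      simp [pv_modify_eq_insert, PySem.Dict.getD_insert_self, PySem.Dict.insert_insert_self]
    rw [hstep, ih]
    simp

-- values stored in Dict.ofList l all occur as second components in l
theorem pv_values_foldl_insert (l : List (String × List (List String)))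
    (d : PySem.Dict String (List (List String))) (v : List (List String))
    (hv : v ∈ (l.foldl (fun d q => d.insert q.1 q.2) d).values) :
    v ∈ d.values ∨ v ∈ l.map Prod.snd := by
  induction l generalizing d with
  | nil => exact Or.inl hv
  | cons q qs ih =>
    rcases ih _ hv with h | h
    · rcases PySem.Dict.mem_values_insert (w := v) (d := d) (k := q.1) (v := q.2) h with h' | h'
      · exact Or.inr (by simp [h'])
      · exact Or.inl h'
    · exact Or.inr (List.mem_cons_of_mem _ h)

theorem pv_values_ofList (l : List (String × List (List String))) (v : List (List String))
    (hv : v ∈ (PySem.Dict.ofList l).values) : v ∈ l.map Prod.snd := by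
  have := pv_values_foldl_insert l PySem.Dict.empty v (by simpa [PySem.Dict.ofList] using hv)
  simpa [PySem.Dict.empty, PySem.Dict.values] using this

theorem pvZipStarGo_succ (n : Nat) (rows : List (List String))
    (h : rows.all (fun l => !l.isEmpty) = true) :
    pvZipStarGo (n + 1) rows = rows.map (fun l => l.headD "") :: pvZipStarGo n (rows.map List.tail) := by
  simp [pvZipStarGo, h]

-- zip(*rows) on rows that all have at least three entries starts with the three columns
theorem pv_zipStarGo_cols (n : Nat) (rows : List (List String))
    (h : ∀ l ∈ rows, 3 ≤ l.length) (hn : 3 ≤ n) :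
    ∃ rest, pvZipStarGo n rows =
      (rows.map (fun l => l.headD "")) ::
      (rows.map (fun l => l.tail.headD "")) ::
      (rows.map (fun l => l.tail.tail.headD "")) :: rest := by
  obtain ⟨m, rfl⟩ : ∃ m, n = m + 3 := ⟨n - 3, by omega⟩
  have h1 : rows.all (fun l => !l.isEmpty) = true := by
    simp only [List.all_eq_true]
    intro l hl
    have := h l hl
    cases l <;> simp_all
  have h2 : (rows.map List.tail).all (fun l => !l.isEmpty) = true := by
    simp only [List.all_eq_true, List.mem_map]
    rintro _ ⟨l, hl, rfl⟩
    have := h l hl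
    cases l with
    | nil => simp_all
    | cons a t => cases t <;> simp_all
  have h3 : ((rows.map List.tail).map List.tail).all (fun l => !l.isEmpty) = true := by
    simp only [List.all_eq_true, List.mem_map]
    rintro _ ⟨_, ⟨l, hl, rfl⟩, rfl⟩
    have := h l hl
    cases l with
    | nil => simp_all
    | cons a t => cases t with
      | nil => simp_all
      | cons b t' => cases t' <;> simp_all
  rw [show m + 3 = (m + 2) + 1 from rfl, pvZipStarGo_succ _ _ h1,
     show m + 2 = (m + 1) + 1 from rfl, pvZipStarGo_succ _ _ h2,
     pvZipStarGo_succ _ _ h3]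
  exact ⟨pvZipStarGo m (((rows.map List.tail).map List.tail).map List.tail), by
    simp [List.map_map, Function.comp]⟩

theorem pv_zipStar_cols (rows : List (List String)) (hne : rows ≠ [])
    (h : ∀ l ∈ rows, 3 ≤ l.length) :
    ∃ rest, pvZipStar rows =
      (rows.map (fun l => l.headD "")) ::
      (rows.map (fun l => l.tail.headD "")) ::
      (rows.map (fun l => l.tail.tail.headD "")) :: rest := by
  cases rows with
  | nil => exact absurd rfl hne
  | cons r rs =>
    exact pv_zipStarGo_cols r.length (r :: rs) h (h r (by simp))

-- pyGet? on a row of length ≥ 3 is head / second / third element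
theorem pv_get_cols (l : List String) (h : 3 ≤ l.length) :
    (PySem.List.pyGet? l 0).getD "" = l.headD "" ∧
    (PySem.List.pyGet? l 1).getD "" = l.tail.headD "" ∧
    (PySem.List.pyGet? l 2).getD "" = l.tail.tail.headD "" := by
  match l, h with
  | a :: b :: c :: t, _ =>
    have h1 : (0 : Int) ≤ (t.length : Int) + 1 + 1 := by omega
    have h2 : (0 : Int) ≤ (t.length : Int) + 1 := by omega
    have h3 : (2 : Int) ≤ (t.length : Int) + 1 + 1 := by omega
    refine ⟨?_, ?_, ?_⟩ <;> simp [PySem.List.pyGet?, PySem.List.pyIdx?, h1, h2, h3]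

-- ===== VERDICT (by name: the statement is the Claim_ definition above) =====
theorem one_dict_to_three_spec : Claim_equal_one_dict_to_three := by
  intro dict _ hpre
  unfold Spec_one_dict_to_three one_dict_to_three one_dict_to_three_alt
  simp only []
  set D := PySem.Dict.ofList dict with hD
  -- every value stored in D consists of rows of length ≥ 3
  have hval : ∀ p ∈ D.items, ∀ l ∈ p.2, 3 ≤ l.length := by
    intro p hp l hl
    have hv : p.2 ∈ D.values := by
      simp only [PySem.Dict.values]
      exact List.mem_map_of_mem hp
    rcases List.mem_map.mp (pv_values_ofList dict p.2 hv) with ⟨q, hq, hq2⟩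
    exact hpre q hq l (hq2 ▸ hl)
  have hnd : D.keys.Nodup := PySem.Dict.nodup_keys_ofList dict
  -- A folds over keys = items.map fst
  have hkeys : D.keys = D.items.map Prod.fst := rfl
  rw [hkeys, List.foldl_map]
  -- the two folds over D.items agree step by step
  rw [PySem.List.foldl_congr_mem
    (g := fun t (p : String × List (List String)) =>
      match pvZipStar p.2 with
      | c0 :: c1 :: c2 :: _ => (t.1.insert p.1 c0, t.2.1.insert p.1 c1, t.2.2.insert p.1 c2)
      | _ => (t.1.insert p.1 [], t.2.1.insert p.1 [], t.2.2.insert p.1 []))]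
  intro t p hp
  have hget : D.getD p.1 [] = p.2 := by
    rcases p with ⟨k, v⟩
    exact PySem.Dict.getD_of_mem_items D hp hnd []
  rw [hget]
  have hrows : ∀ l ∈ p.2, 3 ≤ l.length := hval p hp
  have hloop := pv_inner_loop p.1
    (fun l => (PySem.List.pyGet? l 0).getD "")
    (fun l => (PySem.List.pyGet? l 1).getD "")
    (fun l => (PySem.List.pyGet? l 2).getD "")
    p.2 t.1 t.2.1 t.2.2 [] [] []
  simp only [List.nil_append] at hloop
  rw [hloop]
  cases hrows_ne : p.2 with
  | nil => simp [pvZipStar]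
  | cons r rs =>
    rw [← hrows_ne]
    obtain ⟨rest, hz⟩ := pv_zipStar_cols p.2 (by simp [hrows_ne]) hrows
    rw [hz]
    have hmap0 : p.2.map (fun l => (PySem.List.pyGet? l 0).getD "") = p.2.map (fun l => l.headD "") :=
      List.map_congr_left (fun l hl => (pv_get_cols l (hrows l hl)).1)
    have hmap1 : p.2.map (fun l => (PySem.List.pyGet? l 1).getD "") = p.2.map (fun l => l.tail.headD "") :=
      List.map_congr_left (fun l hl => (pv_get_cols l (hrows l hl)).2.1)
    have hmap2 : p.2.map (fun l => (PySem.List.pyGet? l 2).getD "") = p.2.map (fun l => l.tail.tail.headD "") :=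
      List.map_congr_left (fun l hl => (pv_get_cols l (hrows l hl)).2.2)
    rw [hmap0, hmap1, hmap2]
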